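-- pv_equiv track=rewrite | github.com/HugeNoob/MIT-6.006-Sp20 | ps2/satisfying_booking.py | satisfying_booking
-- ===== SOURCE A (Python) =====
-- def merge_bookings(B1, B2):
--     Bcombined, curr_time = [], 0
--     B1_len, B2_len = len(B1), len(B2)
--     B1_index, B2_index = 0, 0
--
--     while B1_len + B2_len > B1_index + B2_index:
--         # Setting values
--         if B1_index < B1_len:
--             k1, s1, t1 = B1[B1_index]
--         if B2_index < B2_len:
--             k2, s2, t2 = B2[B2_index]
--
--         # B1 done
--         if B1_index == B1_len:
--             k, s, curr_time = k2, max(s2, curr_time), t2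
--             B2_index += 1
--         # B2 done
--         elif B2_index == B2_len:
--             k, s, curr_time = k1, max(s1, curr_time), t1
--             B1_index += 1
--         else:
--             if curr_time <= min(s1, s2):
--                 curr_time = min(s1, s2)
--             if t1 <= s2:
--                 k, s, curr_time = k1, curr_time, t1
--                 B1_index += 1
--             elif t2 <= s1:
--                 k, s, curr_time = k2, curr_time, t2
--                 B2_index += 1
--             elif curr_time < s2:
--                 k, s, curr_time = k1, curr_time, s2
--             elif curr_time < s1:
--                 k, s, curr_time = k2, curr_time, s1
--             else:
--                 k, s, curr_time = k1 + k2, curr_time, min(t1, t2)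
--                 if curr_time == t1:
--                     B1_index += 1
--                 if curr_time == t2:
--                     B2_index += 1
--         Bcombined.append((k, s, curr_time))
--
--     Bfinal = [Bcombined[0]]
--     # Removing adjacent with same k
--     for k1, s1, t1 in Bcombined[1:]:
--         k2, s2, t2 = Bfinal[-1]
--         if k1 == k2 and s1 == t2:
--             Bfinal.pop()
--             Bfinal.append((k1, s2, t1))
--         else:
--             Bfinal.append((k1, s1, t1))
--
--     return Bfinal
--
-- def satisfying_booking(R):
--     '''
--     Input:  R | Tuple of |R| talk request tuples (s, t)
--     Output: B | Tuple of room booking triples (k, s, t)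
--               | that is the booking schedule that satisfies R
--     '''
--     if len(R) == 1:
--         s, t = R[0]
--         return ((1, s, t),)
--     mid = len(R) // 2
--     R1, R2 = R[:mid], R[mid:]
--     B1 = satisfying_booking(R1)
--     B2 = satisfying_booking(R2)
--     B = merge_bookings(B1, B2)
--     return tuple(B)
-- ===== SOURCE B (Python) =====
-- def merge2(B1, B2):
--     # single pass: emit() fuses touching equal-count segments on the fly,
--     # instead of A's separate trailing 'Removing adjacent with same k' pass
--     out = []
--     def emit(k, s, t):
--         if out and out[-1][0] == k and out[-1][2] == s:
--             out[-1] = (k, out[-1][1], t)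
--         else:
--             out.append((k, s, t))
--     d1, d2 = list(B1), list(B2)
--     now = 0
--     while d1 or d2:
--         if not d1:
--             k2, s2, t2 = d2.pop(0)
--             emit(k2, max(s2, now), t2)
--             now = t2
--         elif not d2:
--             k1, s1, t1 = d1.pop(0)
--             emit(k1, max(s1, now), t1)
--             now = t1
--         else:
--             k1, s1, t1 = d1[0]
--             k2, s2, t2 = d2[0]
--             now = max(now, min(s1, s2))
--             if t1 <= s2:
--                 d1.pop(0)
--                 emit(k1, now, t1)
--                 now = t1
--             elif t2 <= s1:
--                 d2.pop(0)
--                 emit(k2, now, t2)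
--                 now = t2
--             elif now < s2:
--                 emit(k1, now, s2)
--                 now = s2
--             elif now < s1:
--                 emit(k2, now, s1)
--                 now = s1
--             else:
--                 end = min(t1, t2)
--                 if end == t1:
--                     d1.pop(0)
--                 if end == t2:
--                     d2.pop(0)
--                 emit(k1 + k2, now, end)
--                 now = end
--     return out
--
-- def satisfying_booking(R):
--     if not R:
--         return ()
--     # explicit post-order stack machine over index ranges instead of recursion
--     stack = [(0, len(R), False)]
--     results = []
--     while stack:
--         lo, hi, ready = stack.pop()
--         if hi - lo == 1:
--             s, t = R[lo]
--             results.append([(1, s, t)])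
--         elif ready:
--             b2 = results.pop()
--             b1 = results.pop()
--             results.append(merge2(b1, b2))
--         else:
--             mid = lo + (hi - lo) // 2
--             stack.append((lo, hi, True))
--             stack.append((mid, hi, False))
--             stack.append((lo, mid, False))
--     return tuple(results[-1])
-- ===== Notes on version B (the rewrite author's own statement) =====
-- stated objective: alternative
-- what changed: A's top-down recursion with list slicing becomes an explicit post-order stack machine over index ranges, and A's two-pass merge (index-driven while loop producing Bcombined, then a separate adjacent-equal-k fusing pass with pop/append) becomes a single pass that consumes the two schedules by popping from the front and fuses touching equal-count segments on the fly through emit().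
-- outside the precondition, e.g. on satisfying_booking([]): A raises RecursionError, B returns []
import Mathlib
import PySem

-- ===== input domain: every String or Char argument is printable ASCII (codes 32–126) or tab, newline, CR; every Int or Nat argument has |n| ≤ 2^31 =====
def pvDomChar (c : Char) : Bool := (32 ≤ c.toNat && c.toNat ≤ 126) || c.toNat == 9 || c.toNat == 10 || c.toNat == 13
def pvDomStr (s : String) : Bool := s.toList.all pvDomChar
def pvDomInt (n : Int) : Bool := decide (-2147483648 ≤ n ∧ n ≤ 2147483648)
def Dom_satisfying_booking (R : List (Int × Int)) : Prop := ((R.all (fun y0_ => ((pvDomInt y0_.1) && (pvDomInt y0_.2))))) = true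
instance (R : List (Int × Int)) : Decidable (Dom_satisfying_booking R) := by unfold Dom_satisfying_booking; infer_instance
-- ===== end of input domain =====

-- B replaces A's top-down recursion by an explicit post-order stack machine over index
-- ranges, and A's two-pass merge by a single pass with on-the-fly fusing; equivalence is
-- proved on every nonempty request list (empty input makes A recurse forever).

-- ===== PORT A =====
-- the while loop of merge_bookings; state = (B1_index, B2_index, curr_time, Bcombined).
-- fuel only totalizes the loop: merge_bookings supplies enough fuel for every reachable state.
def mergeLoop (b1 b2 : List (Int × Int × Int)) :
    Nat → Nat → Nat → Int → List (Int × Int × Int) → List (Int × Int × Int)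
  | 0, _, _, _, acc => acc
  | fuel + 1, i1, i2, curr, acc =>
    if b1.length + b2.length ≤ i1 + i2 then acc
    else if i1 = b1.length then
      -- B1 done
      let g2 := b2.getD i2 (0, 0, 0)   -- B2[B2_index]; in range on every reachable state
      mergeLoop b1 b2 fuel i1 (i2 + 1) g2.2.2 (acc ++ [(g2.1, max g2.2.1 curr, g2.2.2)])
    else if i2 = b2.length then
      -- B2 done
      let g1 := b1.getD i1 (0, 0, 0)
      mergeLoop b1 b2 fuel (i1 + 1) i2 g1.2.2 (acc ++ [(g1.1, max g1.2.1 curr, g1.2.2)])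
    else
      let g1 := b1.getD i1 (0, 0, 0)
      let g2 := b2.getD i2 (0, 0, 0)
      let k1 := g1.1; let s1 := g1.2.1; let t1 := g1.2.2
      let k2 := g2.1; let s2 := g2.2.1; let t2 := g2.2.2
      let curr1 := if curr ≤ min s1 s2 then min s1 s2 else curr
      if t1 ≤ s2 then
        mergeLoop b1 b2 fuel (i1 + 1) i2 t1 (acc ++ [(k1, curr1, t1)])
      else if t2 ≤ s1 then
        mergeLoop b1 b2 fuel i1 (i2 + 1) t2 (acc ++ [(k2, curr1, t2)])
      else if curr1 < s2 then
        mergeLoop b1 b2 fuel i1 i2 s2 (acc ++ [(k1, curr1, s2)])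
      else if curr1 < s1 then
        mergeLoop b1 b2 fuel i1 i2 s1 (acc ++ [(k2, curr1, s1)])
      else
        mergeLoop b1 b2 fuel (if min t1 t2 = t1 then i1 + 1 else i1)
          (if min t1 t2 = t2 then i2 + 1 else i2) (min t1 t2)
          (acc ++ [(k1 + k2, curr1, min t1 t2)])

-- one step of the 'Removing adjacent with same k' loop: Bfinal[-1] inspected, pop/append
def mergePassStep (acc : List (Int × Int × Int)) (g : Int × Int × Int) :
    List (Int × Int × Int) :=
  match acc.getLast? with
  | some glast =>
    if g.1 = glast.1 ∧ g.2.1 = glast.2.2 then acc.dropLast ++ [(g.1, glast.2.1, g.2.2)]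
    else acc ++ [g]
  | none => acc ++ [g]

def merge_bookings (B1 B2 : List (Int × Int × Int)) : List (Int × Int × Int) :=
  let comb := mergeLoop B1 B2 (2 * (B1.length + B2.length) + 2) 0 0 0 []
  match comb with
  | [] => []          -- Python raises IndexError on Bcombined[0] here; unreachable from satisfying_booking
  | c :: rest => rest.foldl mergePassStep [c]

-- fuel = recursion depth budget; Python's recursion terminates iff R ≠ [] (fuel R.length suffices)
def satisfying_bookingFuel : Nat → List (Int × Int) → List (Int × Int × Int)
  | 0, _ => []        -- reached only for R = [], where Python recurses forever (RecursionError)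
  | fuel + 1, R =>
    if R.length = 1 then
      let p := R.getD 0 (0, 0)
      [(1, p.1, p.2)]
    else
      let mid := R.length / 2
      let R1 := PySem.List.slice R none (some (mid : Int))     -- R[:mid]
      let R2 := PySem.List.slice R (some (mid : Int)) none     -- R[mid:]
      merge_bookings (satisfying_bookingFuel fuel R1) (satisfying_bookingFuel fuel R2)

def satisfying_booking (R : List (Int × Int)) : List (Int × Int × Int) :=
  satisfying_bookingFuel R.length R

-- ===== PORT B =====
-- emit(k, s, t): append, fusing with the last segment when counts match and they touch
def emitB (out : List (Int × Int × Int)) (g : Int × Int × Int) : List (Int × Int × Int) :=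
  match out.getLast? with
  | some gl =>
    if gl.1 = g.1 ∧ gl.2.2 = g.2.1 then out.dropLast ++ [(g.1, gl.2.1, g.2.2)]
    else out ++ [g]
  | none => out ++ [g]

-- the while loop of merge2; state = (d1, d2, now, out); fuel only totalizes the loop
def merge2Loop : Nat → List (Int × Int × Int) → List (Int × Int × Int) → Int →
    List (Int × Int × Int) → List (Int × Int × Int)
  | 0, _, _, _, out => out
  | fuel + 1, d1, d2, now, out =>
    match d1, d2 with
    | [], [] => out
    | [], g2 :: e2 =>
      merge2Loop fuel [] e2 g2.2.2 (emitB out (g2.1, max g2.2.1 now, g2.2.2))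
    | g1 :: e1, [] =>
      merge2Loop fuel e1 [] g1.2.2 (emitB out (g1.1, max g1.2.1 now, g1.2.2))
    | g1 :: e1, g2 :: e2 =>
      let now1 := max now (min g1.2.1 g2.2.1)
      if g1.2.2 ≤ g2.2.1 then
        merge2Loop fuel e1 (g2 :: e2) g1.2.2 (emitB out (g1.1, now1, g1.2.2))
      else if g2.2.2 ≤ g1.2.1 then
        merge2Loop fuel (g1 :: e1) e2 g2.2.2 (emitB out (g2.1, now1, g2.2.2))
      else if now1 < g2.2.1 then
        merge2Loop fuel (g1 :: e1) (g2 :: e2) g2.2.1 (emitB out (g1.1, now1, g2.2.1))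
      else if now1 < g1.2.1 then
        merge2Loop fuel (g1 :: e1) (g2 :: e2) g1.2.1 (emitB out (g2.1, now1, g1.2.1))
      else
        merge2Loop fuel (if min g1.2.2 g2.2.2 = g1.2.2 then e1 else g1 :: e1)
          (if min g1.2.2 g2.2.2 = g2.2.2 then e2 else g2 :: e2) (min g1.2.2 g2.2.2)
          (emitB out (g1.1 + g2.1, now1, min g1.2.2 g2.2.2))

def merge2 (B1 B2 : List (Int × Int × Int)) : List (Int × Int × Int) :=
  merge2Loop (2 * (B1.length + B2.length) + 2) B1 B2 0 []

-- the while loop over the explicit task stack; fuel only totalizes the loop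
def stackLoop (R : List (Int × Int)) : Nat → List (Nat × Nat × Bool) →
    List (List (Int × Int × Int)) → List (List (Int × Int × Int))
  | 0, _, results => results
  | _ + 1, [], results => results
  | fuel + 1, (lo, hi, ready) :: rest, results =>
    if hi - lo = 1 then
      let p := R.getD lo (0, 0)
      stackLoop R fuel rest ([(1, p.1, p.2)] :: results)
    else if ready then
      match results with
      | b2 :: b1 :: rs => stackLoop R fuel rest (merge2 b1 b2 :: rs)
      | _ => results          -- unreachable: Python would raise IndexError here
    else
      stackLoop R fuel
        ((lo, lo + (hi - lo) / 2, false) :: (lo + (hi - lo) / 2, hi, false)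
          :: (lo, hi, true) :: rest) results

def satisfying_booking_alt (R : List (Int × Int)) : List (Int × Int × Int) :=
  if R = [] then []
  else (stackLoop R (4 * R.length) [(0, R.length, false)] []).headD []

-- ===== PRECONDITION & SPEC =====
-- Pre_ excludes exactly the empty request list, the only input on which A does not return
-- (its recursion never reaches the base case: RecursionError); B returns () there.
def Pre_satisfying_booking (R : List (Int × Int)) : Prop := R ≠ []
instance (R : List (Int × Int)) : Decidable (Pre_satisfying_booking R) := by
  unfold Pre_satisfying_booking; infer_instance

def pvWitness_satisfying_booking : (List (Int × Int)) := [(0, 2), (1, 3)]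

def Spec_satisfying_booking (R : List (Int × Int)) (out : List (Int × Int × Int)) : Prop :=
  out = satisfying_booking_alt R
instance (R : List (Int × Int)) (out : List (Int × Int × Int)) :
    Decidable (Spec_satisfying_booking R out) := by unfold Spec_satisfying_booking; infer_instance

-- ===== CLAIM (what is proved, stated in full; the proofs are below) =====
def Claim_equal_satisfying_booking : Prop :=
  ∀ (R : List (Int × Int)), Dom_satisfying_booking R → Pre_satisfying_booking R →
    Spec_satisfying_booking R (satisfying_booking R)

-- ===== LEMMAS AND PROOFS =====

theorem emitB_eq : emitB = mergePassStep := by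
  funext acc g
  unfold emitB mergePassStep
  cases acc.getLast? with
  | none => rfl
  | some gl =>
    show (if gl.1 = g.1 ∧ gl.2.2 = g.2.1 then acc.dropLast ++ [(g.1, gl.2.1, g.2.2)]
        else acc ++ [g])
      = (if g.1 = gl.1 ∧ g.2.1 = gl.2.2 then acc.dropLast ++ [(g.1, gl.2.1, g.2.2)]
        else acc ++ [g])
    by_cases h : gl.1 = g.1 ∧ gl.2.2 = g.2.1
    · rw [if_pos h, if_pos ⟨h.1.symm, h.2.symm⟩]
    · rw [if_neg h, if_neg (fun hc => h ⟨hc.1.symm, hc.2.symm⟩)]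

-- the accumulator of A's merge loop is only appended to
set_option maxHeartbeats 1000000 in
theorem mergeLoop_acc (b1 b2 : List (Int × Int × Int)) :
    ∀ (fuel i1 i2 : Nat) (curr : Int) (acc : List (Int × Int × Int)),
    mergeLoop b1 b2 fuel i1 i2 curr acc = acc ++ mergeLoop b1 b2 fuel i1 i2 curr [] := by
  intro fuel
  induction fuel with
  | zero => intro i1 i2 curr acc; simp [mergeLoop]
  | succ fuel ih =>
    intro i1 i2 curr acc
    simp only [mergeLoop]
    split_ifs <;>
      first
        | rw [List.append_nil]
        | (rw [ih]; conv_rhs => rw [ih]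
           simp only [List.nil_append, List.append_assoc])

-- B's merge loop is A's merge loop with the fusing pass applied on the fly
theorem bisim (b1 b2 : List (Int × Int × Int)) :
    ∀ (fuel i1 i2 : Nat) (curr : Int) (out : List (Int × Int × Int)),
    i1 ≤ b1.length → i2 ≤ b2.length →
    merge2Loop fuel (b1.drop i1) (b2.drop i2) curr out
      = (mergeLoop b1 b2 fuel i1 i2 curr []).foldl emitB out := by
  intro fuel
  induction fuel with
  | zero => intro i1 i2 curr out h1 h2; simp [merge2Loop, mergeLoop]
  | succ fuel ih =>
    intro i1 i2 curr out hl1 hl2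
    by_cases hdone : b1.length + b2.length ≤ i1 + i2
    · have h1 : b1.drop i1 = [] := List.drop_eq_nil_of_le (by omega)
      have h2 : b2.drop i2 = [] := List.drop_eq_nil_of_le (by omega)
      rw [h1, h2]
      conv_rhs => simp only [mergeLoop]
      rw [if_pos hdone]
      rfl
    · by_cases hi1 : i1 = b1.length
      · have hi2lt : i2 < b2.length := by omega
        have h1 : b1.drop i1 = [] := List.drop_eq_nil_of_le (by omega)
        have hd2 : b2.drop i2 = b2.getD i2 (0, 0, 0) :: b2.drop (i2 + 1) := by
          rw [List.drop_eq_getElem_cons hi2lt, List.getD_eq_getElem _ _ hi2lt]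
        set G2 := b2.getD i2 (0, 0, 0) with hG2
        rw [h1, hd2]
        have hstep := ih i1 (i2 + 1) G2.2.2
          (emitB out (G2.1, max G2.2.1 curr, G2.2.2)) hl1 (by omega)
        rw [h1] at hstep
        conv_rhs => simp only [mergeLoop]
        rw [if_neg hdone, if_pos hi1, ← hG2, mergeLoop_acc, List.foldl_append]
        simp only [merge2Loop]
        exact hstep
      · by_cases hi2 : i2 = b2.length
        · have hi1lt : i1 < b1.length := by omega
          have h2 : b2.drop i2 = [] := List.drop_eq_nil_of_le (by omega)
          have hd1 : b1.drop i1 = b1.getD i1 (0, 0, 0) :: b1.drop (i1 + 1) := by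
            rw [List.drop_eq_getElem_cons hi1lt, List.getD_eq_getElem _ _ hi1lt]
          set G1 := b1.getD i1 (0, 0, 0) with hG1
          rw [h2, hd1]
          have hstep := ih (i1 + 1) i2 G1.2.2
            (emitB out (G1.1, max G1.2.1 curr, G1.2.2)) (by omega) hl2
          rw [h2] at hstep
          conv_rhs => simp only [mergeLoop]
          rw [if_neg hdone, if_neg hi1, if_pos hi2, ← hG1, mergeLoop_acc, List.foldl_append]
          simp only [merge2Loop]
          exact hstep
        · have hi1lt : i1 < b1.length := by omega
          have hi2lt : i2 < b2.length := by omega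
          have hd1 : b1.drop i1 = b1.getD i1 (0, 0, 0) :: b1.drop (i1 + 1) := by
            rw [List.drop_eq_getElem_cons hi1lt, List.getD_eq_getElem _ _ hi1lt]
          have hd2 : b2.drop i2 = b2.getD i2 (0, 0, 0) :: b2.drop (i2 + 1) := by
            rw [List.drop_eq_getElem_cons hi2lt, List.getD_eq_getElem _ _ hi2lt]
          set G1 := b1.getD i1 (0, 0, 0) with hG1
          set G2 := b2.getD i2 (0, 0, 0) with hG2
          rw [hd1, hd2]
          conv_rhs => simp only [mergeLoop]
          rw [if_neg hdone, if_neg hi1, if_neg hi2, ← hG1, ← hG2]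
          simp only [merge2Loop]
          have hcurr : (if curr ≤ min G1.2.1 G2.2.1 then min G1.2.1 G2.2.1 else curr)
              = max curr (min G1.2.1 G2.2.1) := by
            split_ifs <;> omega
          rw [hcurr]
          by_cases hA : G1.2.2 ≤ G2.2.1
          · rw [if_pos hA, if_pos hA, mergeLoop_acc, List.foldl_append]
            have hstep := ih (i1 + 1) i2
              G1.2.2 (emitB out (G1.1, max curr (min G1.2.1 G2.2.1), G1.2.2)) (by omega) hl2
            rw [hd2] at hstep
            exact hstep
          · rw [if_neg hA, if_neg hA]
            by_cases hB : G2.2.2 ≤ G1.2.1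
            · rw [if_pos hB, if_pos hB, mergeLoop_acc, List.foldl_append]
              have hstep := ih i1 (i2 + 1)
                G2.2.2 (emitB out (G2.1, max curr (min G1.2.1 G2.2.1), G2.2.2)) hl1 (by omega)
              rw [hd1] at hstep
              exact hstep
            · rw [if_neg hB, if_neg hB]
              by_cases hC : max curr (min G1.2.1 G2.2.1) < G2.2.1
              · rw [if_pos hC, if_pos hC, mergeLoop_acc, List.foldl_append]
                have hstep := ih i1 i2
                  G2.2.1 (emitB out (G1.1, max curr (min G1.2.1 G2.2.1), G2.2.1)) hl1 hl2
                rw [hd1, hd2] at hstep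
                exact hstep
              · rw [if_neg hC, if_neg hC]
                by_cases hD : max curr (min G1.2.1 G2.2.1) < G1.2.1
                · rw [if_pos hD, if_pos hD, mergeLoop_acc, List.foldl_append]
                  have hstep := ih i1 i2
                    G1.2.1 (emitB out (G2.1, max curr (min G1.2.1 G2.2.1), G1.2.1)) hl1 hl2
                  rw [hd1, hd2] at hstep
                  exact hstep
                · rw [if_neg hD, if_neg hD, mergeLoop_acc, List.foldl_append]
                  by_cases h5 : min G1.2.2 G2.2.2 = G1.2.2
                  · by_cases h6 : min G1.2.2 G2.2.2 = G2.2.2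
                    · rw [if_pos h5, if_pos h6, if_pos h5, if_pos h6]
                      have hstep := ih (i1 + 1) (i2 + 1) (min G1.2.2 G2.2.2)
                        (emitB out (G1.1 + G2.1, max curr (min G1.2.1 G2.2.1),
                          min G1.2.2 G2.2.2)) (by omega) (by omega)
                      exact hstep
                    · rw [if_pos h5, if_neg h6, if_pos h5, if_neg h6]
                      have hstep := ih (i1 + 1) i2 (min G1.2.2 G2.2.2)
                        (emitB out (G1.1 + G2.1, max curr (min G1.2.1 G2.2.1),
                          min G1.2.2 G2.2.2)) (by omega) hl2
                      rw [hd2] at hstep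
                      exact hstep
                  · have h6 : min G1.2.2 G2.2.2 = G2.2.2 := by omega
                    rw [if_neg h5, if_pos h6, if_neg h5, if_pos h6]
                    have hstep := ih i1 (i2 + 1) (min G1.2.2 G2.2.2)
                      (emitB out (G1.1 + G2.1, max curr (min G1.2.1 G2.2.1),
                        min G1.2.2 G2.2.2)) hl1 (by omega)
                    rw [hd1] at hstep
                    exact hstep

theorem merge2_eq (B1 B2 : List (Int × Int × Int)) :
    merge2 B1 B2 = merge_bookings B1 B2 := by
  have h := bisim B1 B2 (2 * (B1.length + B2.length) + 2) 0 0 0 []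
    (Nat.zero_le _) (Nat.zero_le _)
  simp only [List.drop_zero] at h
  show merge2Loop (2 * (B1.length + B2.length) + 2) B1 B2 0 [] = _
  rw [h]
  unfold merge_bookings
  cases hcomb : mergeLoop B1 B2 (2 * (B1.length + B2.length) + 2) 0 0 0 [] with
  | nil => rfl
  | cons c rest =>
    rw [List.foldl_cons, show emitB [] c = [c] from rfl, emitB_eq]

-- one unfolding of A's recursion, for any positive fuel
theorem sbf_unfold (f : Nat) (S : List (Int × Int)) (hf : 1 ≤ f) :
    satisfying_bookingFuel f S =
      if S.length = 1 then
        [(1, (S.getD 0 (0, 0)).1, (S.getD 0 (0, 0)).2)]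
      else
        merge_bookings
          (satisfying_bookingFuel (f - 1)
            (PySem.List.slice S none (some ((S.length / 2 : Nat) : Int))))
          (satisfying_bookingFuel (f - 1)
            (PySem.List.slice S (some ((S.length / 2 : Nat) : Int)) none)) := by
  obtain ⟨k, rfl⟩ : ∃ k, f = k + 1 := ⟨f - 1, by omega⟩
  simp only [satisfying_bookingFuel]
  rw [Nat.add_sub_cancel]

-- A's recursion does not depend on the exact fuel, as long as it suffices
theorem fuel_mono (f : Nat) : ∀ (f' : Nat) (R : List (Int × Int)), R ≠ [] →
    R.length ≤ f → R.length ≤ f' →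
    satisfying_bookingFuel f R = satisfying_bookingFuel f' R := by
  induction f with
  | zero =>
    intro f' R hne hl _
    cases R with
    | nil => exact absurd rfl hne
    | cons p r => simp at hl
  | succ f ihf =>
    intro f' R hne hl hl'
    cases f' with
    | zero =>
      cases R with
      | nil => exact absurd rfl hne
      | cons p r => simp at hl'
    | succ f'' =>
      simp only [satisfying_bookingFuel]
      by_cases h1 : R.length = 1
      · rw [if_pos h1, if_pos h1]
      · rw [if_neg h1, if_neg h1]
        have hlen2 : 2 ≤ R.length := by
          have : R.length ≠ 0 := by
            intro h0
            exact hne (List.eq_nil_of_length_eq_zero h0)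
          omega
        have hR1 : PySem.List.slice R none (some ((R.length / 2 : Nat) : Int))
            = R.take (R.length / 2) := by
          rw [PySem.List.slice_to R (by positivity), Int.toNat_natCast]
        have hR2 : PySem.List.slice R (some ((R.length / 2 : Nat) : Int)) none
            = R.drop (R.length / 2) := by
          rw [PySem.List.slice_from R (by positivity), Int.toNat_natCast]
        rw [hR1, hR2]
        have hlt1 : (R.take (R.length / 2)).length = R.length / 2 := by
          rw [List.length_take]; omega
        have hlt2 : (R.drop (R.length / 2)).length = R.length - R.length / 2 :=
          List.length_drop
        have hne1 : R.take (R.length / 2) ≠ [] := by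
          intro h
          have := congrArg List.length h
          rw [hlt1] at this
          simp at this
          omega
        have hne2 : R.drop (R.length / 2) ≠ [] := by
          intro h
          have := congrArg List.length h
          rw [hlt2] at this
          simp at this
          omega
        rw [ihf f'' (R.take (R.length / 2)) hne1 (by omega) (by omega),
          ihf f'' (R.drop (R.length / 2)) hne2 (by omega) (by omega)]

-- exact number of loop iterations the stack machine spends on a range of n requests
def cost (n : Nat) : Nat := 3 * n - 2

theorem stackStep (R : List (Int × Int)) :
    ∀ (n lo : Nat) (rest : List (Nat × Nat × Bool))
      (results : List (List (Int × Int × Int))) (fuel' : Nat),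
    1 ≤ n → lo + n ≤ R.length →
    stackLoop R (cost n + fuel') ((lo, lo + n, false) :: rest) results
      = stackLoop R fuel' rest
          (satisfying_bookingFuel n ((R.drop lo).take n) :: results) := by
  intro n
  induction n using Nat.strong_induction_on with
  | _ n ihn =>
    intro lo rest results fuel' h1 hle
    have hlolt : lo < R.length := by omega
    by_cases hn1 : n = 1
    · subst hn1
      rw [show cost 1 + fuel' = fuel' + 1 from by unfold cost; omega]
      simp only [stackLoop]
      rw [if_pos (by omega)]
      have hval : satisfying_bookingFuel 1 ((R.drop lo).take 1)
          = [(1, (R.getD lo (0, 0)).1, (R.getD lo (0, 0)).2)] := by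
        have hl1 : ((R.drop lo).take 1).length = 1 := by
          rw [List.length_take, List.length_drop]; omega
        simp only [satisfying_bookingFuel]
        rw [if_pos hl1]
        have hget : ((R.drop lo).take 1).getD 0 (0, 0) = R.getD lo (0, 0) := by
          rw [List.getD_eq_getElem _ _ (by omega), List.getD_eq_getElem _ _ hlolt]
          rw [List.getElem_take, List.getElem_drop]
          simp
        rw [hget]
      rw [hval]
    · have hn2 : 2 ≤ n := by omega
      have hm1 : 1 ≤ n / 2 := by omega
      have hm2 : 1 ≤ n - n / 2 := by omega
      have hmlt : n / 2 < n := by omega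
      have hmlt2 : n - n / 2 < n := by omega
      rw [show cost n + fuel'
          = (cost (n / 2) + (cost (n - n / 2) + (1 + fuel'))) + 1 from by
        unfold cost; omega]
      simp only [stackLoop]
      rw [if_neg (by omega), if_neg (by simp)]
      rw [show lo + (lo + n - lo) / 2 = lo + n / 2 from by omega]
      rw [ihn (n / 2) hmlt lo _ _ _ hm1 (by omega)]
      rw [show (lo + n / 2, lo + n, false) = (lo + n / 2, (lo + n / 2) + (n - n / 2), false)
        from by rw [show (lo + n / 2) + (n - n / 2) = lo + n from by omega]]
      rw [ihn (n - n / 2) hmlt2 (lo + n / 2) _ _ _ hm2 (by omega)]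
      rw [show 1 + fuel' = fuel' + 1 from by omega]
      simp only [stackLoop]
      rw [if_neg (by omega), if_pos trivial]
      congr 1
      congr 1
      -- merge2 of the two sub-results is A's recursive step on the whole range
      have hSlen : ((R.drop lo).take n).length = n := by
        rw [List.length_take, List.length_drop]; omega
      rw [merge2_eq, sbf_unfold n _ (by omega), if_neg (by rw [hSlen]; omega), hSlen]
      have hR1 : PySem.List.slice ((R.drop lo).take n) none (some ((n / 2 : Nat) : Int))
          = ((R.drop lo).take n).take (n / 2) := by
        rw [PySem.List.slice_to _ (by positivity), Int.toNat_natCast]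
      have hR2 : PySem.List.slice ((R.drop lo).take n) (some ((n / 2 : Nat) : Int)) none
          = ((R.drop lo).take n).drop (n / 2) := by
        rw [PySem.List.slice_from _ (by positivity), Int.toNat_natCast]
      rw [hR1, hR2]
      have htk : ((R.drop lo).take n).take (n / 2) = (R.drop lo).take (n / 2) := by
        rw [List.take_take]
        congr 1
        omega
      have hdr : ((R.drop lo).take n).drop (n / 2)
          = (R.drop (lo + n / 2)).take (n - n / 2) := by
        rw [List.drop_take, List.drop_drop]
        all_goals (congr 1 <;> omega)
      rw [htk, hdr]
      have hlen1 : ((R.drop lo).take (n / 2)).length = n / 2 := by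
        rw [List.length_take, List.length_drop]; omega
      have hlen2 : ((R.drop (lo + n / 2)).take (n - n / 2)).length = n - n / 2 := by
        rw [List.length_take, List.length_drop]; omega
      have hne1 : (R.drop lo).take (n / 2) ≠ [] := by
        intro h
        have := congrArg List.length h
        rw [hlen1] at this
        simp at this
        omega
      have hne2 : (R.drop (lo + n / 2)).take (n - n / 2) ≠ [] := by
        intro h
        have := congrArg List.length h
        rw [hlen2] at this
        simp at this
        omega
      rw [fuel_mono (n / 2) (n - 1) _ hne1 (by omega) (by omega),
        fuel_mono (n - n / 2) (n - 1) _ hne2 (by omega) (by omega)]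

-- ===== VERDICT (by name: the statement is the Claim_ definition above) =====
theorem satisfying_booking_spec : Claim_equal_satisfying_booking := by
  intro R _ hpre
  show satisfying_booking R = satisfying_booking_alt R
  unfold satisfying_booking satisfying_booking_alt
  rw [if_neg hpre]
  have hn : 1 ≤ R.length := List.length_pos_iff.mpr hpre
  rw [show 4 * R.length = cost R.length + (R.length + 2) from by unfold cost; omega]
  have hstep := stackStep R R.length 0 [] [] (R.length + 2) hn (by omega)
  simp only [Nat.zero_add, List.drop_zero, List.take_length] at hstep
  rw [hstep]
  rfl
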